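-- pv_equiv track=rewrite | github.com/ddelgadoJS/XML-Mongo | Parser.py | checkDTags
-- ===== SOURCE A (Python) =====
-- def checkDTags(tagContent, openingTag, closingTag):
--     # In case there are multiple elements inside tag.
--     splittedTagContent = tagContent.split("</D>")
--
--     # If tagContent has more than one value.
--     if len(splittedTagContent) > 1:
--         tagContent = ""
--
--         for i in range(0, len(splittedTagContent) - 1):
--             # First element, doesn't need openingTag.
--             if i == 0:
--                 tagContent += splittedTagContent[i] + closingTag
--
--             # Last element, doesn't need closingTag.
--             elif i == len(splittedTagContent) - 2:
--                 tagContent += openingTag + splittedTagContent[i]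
--
--             # Middle elements, do need openingTag and closingTag.
--             else:
--                 tagContent += openingTag + splittedTagContent[i] + closingTag
--
--     return tagContent
-- ===== SOURCE B (Python) =====
-- def checkDTags(tagContent, openingTag, closingTag):
--     j = tagContent.rfind("</D>")
--     if j == -1:
--         return tagContent
--     head = tagContent[:j]
--     if "</D>" in head:
--         return head.replace("</D>", closingTag + openingTag)
--     return head + closingTag
-- ===== Notes on version B (the rewrite author's own statement) =====
-- stated objective: alternative
-- what changed: B never splits the string into a list: it cuts the input at the last '</D>' found by rfind and then performs one replace of every remaining '</D>' by closingTag+openingTag (appending only closingTag when no inner delimiter remains), instead of A's split followed by an indexed loop with three positional branches.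
import Mathlib
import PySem

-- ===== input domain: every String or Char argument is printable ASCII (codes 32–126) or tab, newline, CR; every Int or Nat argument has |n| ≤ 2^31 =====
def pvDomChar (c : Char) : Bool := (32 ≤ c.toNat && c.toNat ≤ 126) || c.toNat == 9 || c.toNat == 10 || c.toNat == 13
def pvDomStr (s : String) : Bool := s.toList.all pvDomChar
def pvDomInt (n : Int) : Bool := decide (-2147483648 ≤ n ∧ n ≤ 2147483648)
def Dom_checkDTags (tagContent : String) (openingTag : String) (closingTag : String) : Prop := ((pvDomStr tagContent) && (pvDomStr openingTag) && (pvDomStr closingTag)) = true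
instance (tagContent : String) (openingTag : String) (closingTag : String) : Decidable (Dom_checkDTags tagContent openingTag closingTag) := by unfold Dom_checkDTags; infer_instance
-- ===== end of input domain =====

-- B replaces A's split + indexed three-branch rebuild loop by a different algorithm: cut the
-- string at the last "</D>" (rfind) and do one replace of each remaining "</D>" (alternative).

-- ===== PORT A =====
-- literal port of A's loop over range(0, len-1) with its three branches, on code-point lists
def checkDTags (tagContent : String) (openingTag : String) (closingTag : String) : String :=
  let sp := PySem.Chars.splitOn tagContent.toList "</D>".toList
  if sp.length > 1 then
    String.ofList ((PySem.List.pyRange 0 ((sp.length : Int) - 1) 1).foldl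
      (fun acc i =>
        if i = 0 then
          acc ++ PySem.List.pyGetD sp i [] ++ closingTag.toList
        else if i = (sp.length : Int) - 2 then
          acc ++ openingTag.toList ++ PySem.List.pyGetD sp i []
        else
          acc ++ openingTag.toList ++ PySem.List.pyGetD sp i [] ++ closingTag.toList)
      [])
  else tagContent

-- ===== PORT B =====
-- literal port of Source B: rfind the last "</D>", slice the head off, one replace (or append closingTag)
def checkDTags_alt (tagContent : String) (openingTag : String) (closingTag : String) : String :=
  let j := PySem.Chars.rfind tagContent.toList "</D>".toList
  if j = -1 then tagContent
  else
    let head := PySem.List.slice tagContent.toList none (some j)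
    if PySem.Chars.isIn "</D>".toList head then
      String.ofList (PySem.Chars.replace head "</D>".toList (closingTag.toList ++ openingTag.toList))
    else
      String.ofList (head ++ closingTag.toList)

-- ===== PRECONDITION & SPEC =====
def Spec_checkDTags (tagContent : String) (openingTag : String) (closingTag : String) (out : String) : Prop := out = checkDTags_alt tagContent openingTag closingTag
instance (tagContent : String) (openingTag : String) (closingTag : String) (out : String) : Decidable (Spec_checkDTags tagContent openingTag closingTag out) := by unfold Spec_checkDTags; infer_instance

-- ===== CLAIM (what is proved, stated in full; the proofs are below) =====
def Claim_equal_checkDTags : Prop := ∀ (tagContent : String) (openingTag : String) (closingTag : String), Dom_checkDTags tagContent openingTag closingTag → Spec_checkDTags tagContent openingTag closingTag (checkDTags tagContent openingTag closingTag)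

-- ===== LEMMAS AND PROOFS =====

-- the delimiter as a literal list of code points
def pvD : List Char := ['<', '/', 'D', '>']

theorem pvD_toList : "</D>".toList = pvD := by decide

-- reference model of Python's greedy left-to-right split (fuel-indexed)
def msplit (d : List Char) : Nat → List Char → List (List Char)
  | 0, l => [l]
  | f + 1, l =>
    match l with
    | [] => [[]]
    | c :: rest =>
      if d.isPrefixOf l then [] :: msplit d f (l.drop d.length)
      else
        match msplit d f rest with
        | [] => [[c]]
        | p :: ps => (c :: p) :: ps

-- fuel-free form
def MS (d l : List Char) : List (List Char) := msplit d l.length l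

theorem msplit_ne_nil (d : List Char) (f : Nat) (l : List Char) : msplit d f l ≠ [] := by
  induction f generalizing l with
  | zero => simp [msplit]
  | succ f ih =>
    cases l with
    | nil => simp [msplit]
    | cons c rest =>
      simp only [msplit]
      split
      · simp
      · cases h : msplit d f rest <;> simp

theorem msplit_fuel (d : List Char) (hd : d ≠ []) :
    ∀ (f g : Nat) (l : List Char), l.length ≤ f → l.length ≤ g → msplit d f l = msplit d g l := by
  intro f
  induction f with
  | zero =>
    intro g l hf hg
    have : l = [] := List.eq_nil_of_length_eq_zero (Nat.le_zero.mp hf)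
    subst this
    cases g <;> simp [msplit]
  | succ f ih =>
    intro g l hf hg
    cases l with
    | nil => cases g <;> simp [msplit]
    | cons c rest =>
      cases g with
      | zero => simp at hg
      | succ g =>
        have hd1 : 1 ≤ d.length := by
          cases d with
          | nil => exact absurd rfl hd
          | cons a b => simp
        simp only [msplit]
        split
        · rw [ih g (List.drop d.length (c :: rest))
            (by simp at hf ⊢; omega) (by simp at hg ⊢; omega)]
        · rw [ih g rest (by simp at hf; omega) (by simp at hg; omega)]

theorem MS_eq (d : List Char) (hd : d ≠ []) (f : Nat) (l : List Char) (h : l.length ≤ f) :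
    msplit d f l = MS d l := msplit_fuel d hd f l.length l h le_rfl

theorem MS_ne_nil (d l : List Char) : MS d l ≠ [] := msplit_ne_nil d l.length l

-- unfolding lemmas for MS
theorem MS_nil (d : List Char) : MS d [] = [[]] := by simp [MS, msplit]

theorem MS_pos (d : List Char) (hd : d ≠ []) (l : List Char) (hl : l ≠ []) (h : d <+: l) :
    MS d l = [] :: MS d (l.drop d.length) := by
  cases l with
  | nil => exact absurd rfl hl
  | cons c rest =>
    have hd1 : 1 ≤ d.length := by
      cases d with
      | nil => exact absurd rfl hd
      | cons a b => simp
    have hp : d.isPrefixOf (c :: rest) = true := List.isPrefixOf_iff_prefix.mpr h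
    simp only [MS, List.length_cons, msplit, hp, if_true]
    rw [msplit_fuel d hd rest.length (List.drop d.length (c :: rest)).length
      (List.drop d.length (c :: rest)) (by simp; omega) le_rfl]

theorem MS_neg (d : List Char) (c : Char) (rest : List Char)
    (h : ¬ d <+: (c :: rest)) :
    MS d (c :: rest) = match MS d rest with
      | [] => [[c]]
      | p :: ps => (c :: p) :: ps := by
  have hp : d.isPrefixOf (c :: rest) = false := by
    rw [Bool.eq_false_iff]
    intro hc
    exact h (List.isPrefixOf_iff_prefix.mp hc)
  simp only [MS, List.length_cons, msplit, hp, Bool.false_eq_true, if_false]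

theorem splitOn_go_eq (d : List Char) : ∀ (fuel : Nat) (l cur : List Char) (acc : List (List Char)),
    PySem.Chars.splitOn.go d fuel l cur acc
      = acc.reverse ++ (match msplit d fuel l with
          | [] => [cur.reverse ++ l]
          | p :: ps => (cur.reverse ++ p) :: ps) := by
  intro fuel
  induction fuel with
  | zero =>
    intro l cur acc
    show ((cur.reverse ++ l) :: acc).reverse = _
    simp [msplit]
  | succ f ih =>
    intro l cur acc
    cases l with
    | nil =>
      show (cur.reverse :: acc).reverse = _
      simp [msplit]
    | cons c rest =>
      rw [show PySem.Chars.splitOn.go d (f+1) (c :: rest) cur acc =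
          (if d.isPrefixOf (c :: rest) then
            PySem.Chars.splitOn.go d f (List.drop d.length (c :: rest)) [] (cur.reverse :: acc)
           else PySem.Chars.splitOn.go d f rest (c :: cur) acc) from rfl]
      by_cases hp : d.isPrefixOf (c :: rest) = true
      · rw [if_pos hp, ih]
        obtain ⟨p, ps, hms⟩ : ∃ p ps, msplit d f (List.drop d.length (c :: rest)) = p :: ps := by
          cases h : msplit d f (List.drop d.length (c :: rest)) with
          | nil => exact absurd h (msplit_ne_nil d f _)
          | cons p ps => exact ⟨p, ps, rfl⟩
        simp only [msplit, hp, if_true, hms]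
        simp
      · have hp' : d.isPrefixOf (c :: rest) = false := Bool.eq_false_iff.mpr hp
        rw [if_neg (by simpa using hp), ih]
        obtain ⟨p, ps, hms⟩ : ∃ p ps, msplit d f rest = p :: ps := by
          cases h : msplit d f rest with
          | nil => exact absurd h (msplit_ne_nil d f _)
          | cons p ps => exact ⟨p, ps, rfl⟩
        simp only [msplit, hp', Bool.false_eq_true, if_false, hms]
        simp

-- splitOn computes MS
theorem splitOn_eq_MS (l : List Char) : PySem.Chars.splitOn l pvD = MS pvD l := by
  show PySem.Chars.splitOn.go pvD (l.length + 1) l [] [] = MS pvD l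
  rw [splitOn_go_eq, MS_eq pvD (by decide) (l.length + 1) l (by omega)]
  obtain ⟨p, ps, hms⟩ : ∃ p ps, MS pvD l = p :: ps := by
    cases h : MS pvD l with
    | nil => exact absurd h (MS_ne_nil pvD l)
    | cons p ps => exact ⟨p, ps, rfl⟩
  simp [hms]

-- replace computes join over MS
theorem replace_go_eq (d new : List Char) : ∀ (fuel : Nat) (l : List Char) (acc : List Char),
    PySem.Chars.replace.go d new fuel l acc
      = acc.reverse ++ PySem.Chars.join new (msplit d fuel l) := by
  intro fuel
  induction fuel with
  | zero =>
    intro l acc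
    show acc.reverse ++ l = _
    simp [msplit, PySem.Chars.join_singleton]
  | succ f ih =>
    intro l acc
    cases l with
    | nil =>
      show acc.reverse = _
      simp [msplit]
    | cons c rest =>
      rw [show PySem.Chars.replace.go d new (f+1) (c :: rest) acc =
          (if d.isPrefixOf (c :: rest) then
            PySem.Chars.replace.go d new f (List.drop d.length (c :: rest)) (new.reverse ++ acc)
           else PySem.Chars.replace.go d new f rest (c :: acc)) from rfl]
      by_cases hp : d.isPrefixOf (c :: rest) = true
      · rw [if_pos hp, ih]
        obtain ⟨p, ps, hms⟩ : ∃ p ps, msplit d f (List.drop d.length (c :: rest)) = p :: ps := by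
          cases h : msplit d f (List.drop d.length (c :: rest)) with
          | nil => exact absurd h (msplit_ne_nil d f _)
          | cons p ps => exact ⟨p, ps, rfl⟩
        simp only [msplit, hp, if_true, hms, PySem.Chars.join_cons_cons]
        simp
      · have hp' : d.isPrefixOf (c :: rest) = false := Bool.eq_false_iff.mpr hp
        rw [if_neg (by simpa using hp), ih]
        obtain ⟨p, ps, hms⟩ : ∃ p ps, msplit d f rest = p :: ps := by
          cases h : msplit d f rest with
          | nil => exact absurd h (msplit_ne_nil d f _)
          | cons p ps => exact ⟨p, ps, rfl⟩
        simp only [msplit, hp', Bool.false_eq_true, if_false, hms]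
        cases ps with
        | nil => simp [PySem.Chars.join_singleton]
        | cons q qs => simp [PySem.Chars.join_cons_cons]

theorem replace_eq_MS (l new : List Char) :
    PySem.Chars.replace l pvD new = PySem.Chars.join new (MS pvD l) := by
  show (if pvD.isEmpty = true then _ else PySem.Chars.replace.go pvD new l.length l [])
      = PySem.Chars.join new (MS pvD l)
  rw [if_neg (by decide), replace_go_eq, MS_eq pvD (by decide) l.length l le_rfl]
  simp

-- structure of MS: it joins back, and pieces are delimiter-free

theorem join_MS (l : List Char) : PySem.Chars.join pvD (MS pvD l) = l := by
  generalize hn : l.length = n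
  induction n using Nat.strong_induction_on generalizing l with
  | _ n ih =>
  cases l with
  | nil => simp [MS_nil, PySem.Chars.join_singleton]
  | cons c rest =>
    by_cases hp : pvD <+: (c :: rest)
    · rw [MS_pos pvD (by decide) _ (by simp) hp]
      obtain ⟨t, ht⟩ := hp
      have hdrop : (c :: rest).drop pvD.length = t := by rw [← ht]; simp
      rw [hdrop]
      obtain ⟨p, ps, hms⟩ : ∃ p ps, MS pvD t = p :: ps := by
        cases h : MS pvD t with
        | nil => exact absurd h (MS_ne_nil pvD t)
        | cons p ps => exact ⟨p, ps, rfl⟩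
      rw [hms, PySem.Chars.join_cons_cons, ← hms,
        ih t.length (by rw [← ht] at hn; simp [pvD] at hn; omega) t rfl]
      simpa using ht
    · rw [MS_neg pvD c rest hp]
      obtain ⟨p, ps, hms⟩ : ∃ p ps, MS pvD rest = p :: ps := by
        cases h : MS pvD rest with
        | nil => exact absurd h (MS_ne_nil pvD rest)
        | cons p ps => exact ⟨p, ps, rfl⟩
      have hrest : PySem.Chars.join pvD (MS pvD rest) = rest :=
        ih rest.length (by simp at hn; omega) rest rfl
      rw [hms] at hrest ⊢
      cases ps with
      | nil =>
        rw [PySem.Chars.join_singleton] at hrest ⊢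
        simp [hrest]
      | cons q qs =>
        rw [PySem.Chars.join_cons_cons] at hrest ⊢
        simp [← hrest]

theorem MS_free (l : List Char) : ∀ p ∈ MS pvD l, ¬ pvD <:+: p := by
  generalize hn : l.length = n
  induction n using Nat.strong_induction_on generalizing l with
  | _ n ih =>
  cases l with
  | nil =>
    rw [MS_nil]
    intro p hp
    simp at hp
    subst hp
    decide
  | cons c rest =>
    by_cases hp : pvD <+: (c :: rest)
    · rw [MS_pos pvD (by decide) _ (by simp) hp]
      obtain ⟨t, ht⟩ := hp
      have hdrop : (c :: rest).drop pvD.length = t := by rw [← ht]; simp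
      rw [hdrop]
      intro p hmem
      rcases List.mem_cons.mp hmem with h1 | h2
      · subst h1; decide
      · exact ih t.length (by rw [← ht] at hn; simp [pvD] at hn; omega) t rfl p h2
    · rw [MS_neg pvD c rest hp]
      obtain ⟨p, ps, hms⟩ : ∃ p ps, MS pvD rest = p :: ps := by
        cases h : MS pvD rest with
        | nil => exact absurd h (MS_ne_nil pvD rest)
        | cons p ps => exact ⟨p, ps, rfl⟩
      have ihrest := ih rest.length (by simp at hn; omega) rest rfl
      have hpfx : p <+: rest := by
        have hj := join_MS rest
        rw [hms] at hj
        cases ps with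
        | nil => rw [PySem.Chars.join_singleton] at hj; exact hj ▸ List.prefix_refl p
        | cons q qs =>
          rw [PySem.Chars.join_cons_cons] at hj
          exact ⟨pvD ++ PySem.Chars.join pvD (q :: qs), by simpa using hj⟩
      rw [hms]
      intro x hmem
      rcases List.mem_cons.mp hmem with h1 | h2
      · subst h1
        intro hinf
        rcases List.infix_cons_iff.mp hinf with hca | hin
        · have : (c :: p) <+: (c :: rest) := List.cons_prefix_cons.mpr ⟨rfl, hpfx⟩
          exact hp (hca.trans this)
        · exact ihrest p (by rw [hms]; exact List.mem_cons_self) hin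
      · exact ihrest x (by rw [hms]; exact List.mem_cons_of_mem p h2)

-- pvD does not overlap itself
theorem pvD_noOverlap (k : Nat) (h1 : 1 ≤ k) (h2 : k ≤ 3) : pvD.drop k ≠ pvD.take (4 - k) := by
  interval_cases k <;> decide

theorem pvD_straddle (q r : List Char) (hne : q ≠ []) (hq : ¬ pvD <:+: q) :
    ¬ pvD <+: (q ++ pvD ++ r) := by
  intro h
  have hk1 : 1 ≤ q.length := by
    cases q with
    | nil => exact absurd rfl hne
    | cons a b => simp
  have hEq : pvD = (q ++ pvD ++ r).take 4 := by
    have := List.prefix_iff_eq_take.mp h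
    simpa using this
  by_cases hk4 : 4 ≤ q.length
  · have : pvD = q.take 4 := by
      rw [hEq, List.append_assoc, List.take_append_of_le_length hk4]
    exact hq ((this ▸ List.take_prefix 4 q).isInfix)
  · have hk3 : q.length ≤ 3 := by omega
    have hq4 : q.take 4 = q := List.take_of_length_le (by omega)
    have hEq2 : pvD = q ++ pvD.take (4 - q.length) := by
      conv_lhs => rw [hEq]
      rw [List.append_assoc, List.take_append, hq4,
        List.take_append_of_le_length
          (by simp only [pvD, List.length_cons, List.length_nil]; omega)]
    have hcon : pvD.drop q.length = pvD.take (4 - q.length) := by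
      conv_lhs => rw [hEq2]
      rw [List.drop_append]
      simp
    exact pvD_noOverlap q.length hk1 hk3 hcon

theorem MS_of_free (q : List Char) (hq : ¬ pvD <:+: q) : MS pvD q = [q] := by
  induction q with
  | nil => exact MS_nil pvD
  | cons c rest ih =>
    rw [MS_neg pvD c rest (fun hc => hq hc.isInfix),
      ih (fun hi => hq (List.infix_cons hi))]

theorem MS_prepend_free (q : List Char) (hq : ¬ pvD <:+: q) (r : List Char) :
    MS pvD (q ++ pvD ++ r) = q :: MS pvD r := by
  induction q with
  | nil =>
    simp only [List.nil_append]
    rw [MS_pos pvD (by decide) _ (by simp [pvD]) (List.prefix_append pvD r)]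
    congr 1
  | cons c rest ih =>
    have hstr : ¬ pvD <+: ((c :: rest) ++ pvD ++ r) := pvD_straddle (c :: rest) r (by simp) hq
    have : (c :: rest) ++ pvD ++ r = c :: (rest ++ pvD ++ r) := by simp
    rw [this] at hstr ⊢
    rw [MS_neg pvD c _ hstr, ih (fun hi => hq (List.infix_cons hi))]

theorem MS_join_pieces (qs : List (List Char)) (hne : qs ≠ [])
    (hfree : ∀ q ∈ qs, ¬ pvD <:+: q) :
    MS pvD (PySem.Chars.join pvD qs) = qs := by
  induction qs with
  | nil => exact absurd rfl hne
  | cons q rest ih =>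
    cases rest with
    | nil =>
      rw [PySem.Chars.join_singleton]
      exact MS_of_free q (hfree q List.mem_cons_self)
    | cons q' rest' =>
      rw [PySem.Chars.join_cons_cons,
        MS_prepend_free q (hfree q List.mem_cons_self) _,
        ih (by simp) (fun x hx => hfree x (List.mem_cons_of_mem q hx))]

theorem infix_iff_MS_len (l : List Char) : pvD <:+: l ↔ 2 ≤ (MS pvD l).length := by
  constructor
  · intro h
    by_contra hlen
    obtain ⟨p, ps, hms⟩ : ∃ p ps, MS pvD l = p :: ps := by
      cases hh : MS pvD l with
      | nil => exact absurd hh (MS_ne_nil pvD l)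
      | cons p ps => exact ⟨p, ps, rfl⟩
    have hps : ps = [] := by
      rw [hms] at hlen
      cases ps with
      | nil => rfl
      | cons a b => exact absurd (by simp) hlen
    subst hps
    have hj := join_MS l
    rw [hms, PySem.Chars.join_singleton] at hj
    exact MS_free l p (by rw [hms]; exact List.mem_cons_self) (hj ▸ h)
  · intro h
    obtain ⟨p, p', ps, hms⟩ : ∃ p p' ps, MS pvD l = p :: p' :: ps := by
      cases hh : MS pvD l with
      | nil => exact absurd hh (MS_ne_nil pvD l)
      | cons p rest =>
        cases rest with
        | nil => exfalso; rw [hh] at h; simp at h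
        | cons p' ps => exact ⟨p, p', ps, rfl⟩
    have hj := join_MS l
    rw [hms, PySem.Chars.join_cons_cons] at hj
    exact ⟨p, PySem.Chars.join pvD (p' :: ps), by rw [← hj, List.append_assoc]⟩

-- rfind characterisation
theorem rgo_neg (s sub : List Char) (j : Nat)
    (h : ∀ i ≤ j, sub.isPrefixOf (s.drop i) = false) :
    PySem.Chars.rfind.go s sub j = -1 := by
  induction j with
  | zero =>
    show (if sub.isPrefixOf s then (0 : Int) else -1) = -1
    have := h 0 le_rfl
    simp at this
    simp [this]
  | succ j ih =>
    show (if sub.isPrefixOf (s.drop (j + 1)) then ((j : Int) + 1) else PySem.Chars.rfind.go s sub j) = -1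
    rw [h (j + 1) le_rfl]
    simpa using ih (fun i hi => h i (Nat.le_succ_of_le hi))

theorem rgo_pos (s sub : List Char) (m j : Nat) (hmj : m ≤ j)
    (hm : sub.isPrefixOf (s.drop m) = true)
    (hnone : ∀ i, m < i → i ≤ j → sub.isPrefixOf (s.drop i) = false) :
    PySem.Chars.rfind.go s sub j = (m : Int) := by
  induction j with
  | zero =>
    have hm0 : m = 0 := Nat.le_zero.mp hmj
    subst hm0
    show (if sub.isPrefixOf s then (0 : Int) else -1) = 0
    simp at hm
    simp [hm]
  | succ j ih =>
    show (if sub.isPrefixOf (s.drop (j + 1)) then ((j : Int) + 1) else PySem.Chars.rfind.go s sub j) = (m : Int)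
    by_cases he : m = j + 1
    · subst he
      rw [hm]
      simp
    · have hmj' : m ≤ j := by omega
      rw [hnone (j + 1) (by omega) le_rfl]
      simpa using ih hmj' (fun i h1 h2 => hnone i h1 (Nat.le_succ_of_le h2))

theorem rfind_neg (t : List Char) (h : ¬ pvD <:+: t) : PySem.Chars.rfind t pvD = -1 := by
  show PySem.Chars.rfind.go t pvD t.length = -1
  apply rgo_neg
  intro i _
  rw [Bool.eq_false_iff]
  intro hc
  exact h ((List.isPrefixOf_iff_prefix.mp hc).isInfix.trans (List.drop_suffix i t).isInfix)

theorem rfind_pos (pre last : List Char) (hlast : ¬ pvD <:+: last) :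
    PySem.Chars.rfind (pre ++ pvD ++ last) pvD = (pre.length : Int) := by
  show PySem.Chars.rfind.go (pre ++ pvD ++ last) pvD (pre ++ pvD ++ last).length = (pre.length : Int)
  apply rgo_pos
  · simp
  · rw [List.append_assoc, List.drop_append_of_le_length le_rfl, List.drop_length,
      List.nil_append]
    exact List.isPrefixOf_iff_prefix.mpr (List.prefix_append pvD last)
  · intro i hi _
    rw [Bool.eq_false_iff]
    intro hc
    have hpfx := List.isPrefixOf_iff_prefix.mp hc
    rw [List.append_assoc, List.drop_append,
      List.drop_of_length_le (by omega : pre.length ≤ i), List.nil_append] at hpfx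
    set k := i - pre.length with hk
    have hk1 : 1 ≤ k := by omega
    rw [List.drop_append] at hpfx
    by_cases hk4 : 4 ≤ k
    · rw [List.drop_of_length_le (by simp [pvD]; omega), List.nil_append] at hpfx
      exact hlast (hpfx.isInfix.trans (List.drop_suffix _ last).isInfix)
    · have hk3 : k ≤ 3 := by omega
      have hkd : k - pvD.length = 0 := by
        simp only [pvD, List.length_cons, List.length_nil]
        omega
      rw [hkd, List.drop_zero] at hpfx
      have htake : pvD = (pvD.drop k ++ last).take 4 := by
        have := List.prefix_iff_eq_take.mp hpfx
        simpa using this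
      have hlen : (pvD.drop k).length = 4 - k := by
        simp [pvD]
      have hcon : pvD.take (4 - k) = pvD.drop k := by
        conv_lhs => rw [htake]
        rw [List.take_take, Nat.min_eq_left (by omega),
          List.take_append_of_le_length (le_of_eq hlen.symm),
          List.take_of_length_le (le_of_eq hlen)]
      exact pvD_noOverlap k hk1 hk3 hcon.symm

theorem join_concat (d x : List Char) (qs : List (List Char)) (h : qs ≠ []) :
    PySem.Chars.join d (qs ++ [x]) = PySem.Chars.join d qs ++ d ++ x := by
  induction qs with
  | nil => exact absurd rfl h
  | cons q rest ih =>
    cases rest with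
    | nil => simp [PySem.Chars.join_cons_cons, PySem.Chars.join_singleton]
    | cons q' rest' =>
      show PySem.Chars.join d (q :: ((q' :: rest') ++ [x])) = _
      rw [show (q' :: rest') ++ [x] = q' :: (rest' ++ [x]) from rfl,
        PySem.Chars.join_cons_cons,
        show (q' : List Char) :: (rest' ++ [x]) = (q' :: rest') ++ [x] from rfl,
        ih (by simp), PySem.Chars.join_cons_cons]
      simp

-- A-side: the foldl in canonical form (proved for the previous file, reused)
theorem checkDTags_key (o c : List Char) (mid : List (List Char)) (hne : mid ≠ []) :
    (mid.dropLast).flatMap (fun x => o ++ x ++ c) ++ o ++ mid.getLast hne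
      = o ++ PySem.Chars.join (c ++ o) mid := by
  induction mid with
  | nil => exact absurd rfl hne
  | cons x rest ih =>
    cases rest with
    | nil => simp [PySem.Chars.join_singleton]
    | cons y rest' =>
      have ih' := ih (by simp)
      simp only [List.append_assoc] at ih' ⊢
      rw [PySem.Chars.join_cons_cons]
      simp only [List.append_assoc, ← ih']
      simp [List.getLast_cons]

theorem checkDTags_main (o c : List Char) (ps : List (List Char)) (h : 2 ≤ ps.length) :
    (PySem.List.pyRange 0 ((ps.length : Int) - 1) 1).foldl
      (fun acc i =>
        if i = 0 then acc ++ PySem.List.pyGetD ps i [] ++ c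
        else if i = (ps.length : Int) - 2 then acc ++ o ++ PySem.List.pyGetD ps i []
        else acc ++ o ++ PySem.List.pyGetD ps i [] ++ c) []
    = (PySem.List.pyGetD ps 0 [] ++ c) ++
      (if ps.length > 2 then
        o ++ PySem.Chars.join (c ++ o) (PySem.List.slice ps (some 1) (some (-1)))
       else []) := by
  set n := ps.length with hn
  by_cases h2 : n = 2
  · rw [show ((n:Int) - 1) = 0 + 1 by omega, PySem.List.pyRange_one_singleton]
    simp [h2]
  · have h3 : 3 ≤ n := by omega
    rw [PySem.List.pyRange_one_append 0 1 ((n:Int)-1) (by omega) (by omega),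
        PySem.List.pyRange_one_append 1 ((n:Int)-2) ((n:Int)-1) (by omega) (by omega),
        show ((n:Int)-1) = ((n:Int)-2) + 1 by ring,
        show PySem.List.pyRange 0 1 1 = [0] from by decide,
        PySem.List.pyRange_one_singleton]
    rw [List.foldl_append, List.foldl_append]
    simp only [List.foldl_cons, List.foldl_nil, List.nil_append, if_true]
    rw [if_neg (show ¬((n:Int) - 2 = 0) by omega)]
    rw [PySem.List.foldl_congr_mem _ _
        (fun acc i => acc ++ (o ++ PySem.List.pyGetD ps i [] ++ c)) _
        (by intro acc i hi
            rw [PySem.List.mem_pyRange_one] at hi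
            rw [if_neg (by omega), if_neg (by omega)]
            simp [List.append_assoc])]
    rw [PySem.List.foldl_append_eq_flatMap]
    have hmid : PySem.List.slice ps (some 1) (some (-1)) = List.take (n-2) (List.drop 1 ps) := by
      simp [PySem.List.slice, Nat.min_eq_left (show 1 ≤ ps.length by omega)]
      rw [show ps.length - 1 - 1 = n - 2 from by omega]
      omega
    rw [if_pos (show n > 2 by omega), hmid]
    set mid := List.take (n-2) (List.drop 1 ps) with hm
    have hmlen : mid.length = n - 2 := by
      rw [hm]; simp; omega
    have hmne : mid ≠ [] := by
      intro e; rw [e] at hmlen; simp at hmlen; omega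
    rw [← checkDTags_key o c mid hmne]
    have hdl : mid.dropLast = (ps.take (n-2)).drop 1 := by
      rw [List.dropLast_eq_take, hmlen, hm, List.take_take, List.drop_take]
      congr 1
      omega
    have hflat : (PySem.List.pyRange 1 ((n:Int)-2) 1).flatMap
        (fun i => o ++ PySem.List.pyGetD ps i [] ++ c)
        = mid.dropLast.flatMap (fun x => o ++ x ++ c) := by
      have hxlen : ((ps.take (n-2)).length : Int) = (n:Int) - 2 := by
        simp; omega
      have hmapc : (PySem.List.pyRange 1 ((n:Int)-2) 1).map (fun i => PySem.List.pyGetD ps i [])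
          = (PySem.List.pyRange 1 ((n:Int)-2) 1).map (fun i => PySem.List.pyGetD (ps.take (n-2)) i []) := by
        apply List.map_congr_left
        intro i hi
        rw [PySem.List.mem_pyRange_one] at hi
        have hk : i = ((i.toNat : Nat) : Int) := by omega
        rw [hk, PySem.List.pyGetD_natCast, PySem.List.pyGetD_natCast]
        have hlt : i.toNat < n - 2 := by omega
        simp [List.getD_eq_getElem?_getD, List.getElem?_take_of_lt hlt]
      have hmap : (PySem.List.pyRange 1 ((n:Int)-2) 1).map (fun i => PySem.List.pyGetD (ps.take (n-2)) i [])
          = (ps.take (n-2)).drop 1 := by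
        rw [← hxlen]
        exact PySem.List.map_pyGetD_pyRange' (ps.take (n-2)) [] (by norm_num)
      calc (PySem.List.pyRange 1 ((n:Int)-2) 1).flatMap (fun i => o ++ PySem.List.pyGetD ps i [] ++ c)
          = (((PySem.List.pyRange 1 ((n:Int)-2) 1).map (fun i => PySem.List.pyGetD ps i [])).map
              (fun x => o ++ x ++ c)).flatten := by
            rw [List.map_map, List.flatMap_def]
            rfl
        _ = ((((ps.take (n-2)).drop 1).map (fun x => o ++ x ++ c))).flatten := by
            rw [hmapc, hmap]
        _ = mid.dropLast.flatMap (fun x => o ++ x ++ c) := by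
            rw [hdl, List.flatMap_def]
    have hlast : PySem.List.pyGetD ps ((n:Int)-2) [] = mid.getLast hmne := by
      rw [show ((n:Int)-2) = ((n-2 : Nat) : Int) from by omega, PySem.List.pyGetD_natCast]
      have h1 : mid.getLast? = some (mid.getLast hmne) := List.getLast?_eq_some_getLast hmne
      have h2 : mid.getLast? = mid[mid.length - 1]? := List.getLast?_eq_getElem?
      have h3' : mid[mid.length - 1]? = ps[n-2]? := by
        rw [hmlen, hm]
        rw [List.getElem?_take_of_lt (by omega : n - 2 - 1 < n - 2), List.getElem?_drop]
        congr 1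
        omega
      have h4 : ps[n-2]? = some (mid.getLast hmne) := by rw [← h3', ← h2, h1]
      simp [List.getD_eq_getElem?_getD, h4]
    rw [hflat, hlast]
    simp [List.append_assoc]

-- ===== VERDICT (by name: the statement is the Claim_ definition above) =====
theorem checkDTags_spec : Claim_equal_checkDTags := by
  intro t o c _
  unfold Spec_checkDTags checkDTags checkDTags_alt
  rw [pvD_toList, splitOn_eq_MS]
  set l := t.toList with hl
  set ps := MS pvD l with hps
  by_cases hk : ps.length ≤ 1
  · -- no delimiter: both return the input unchanged
    have hnotin : ¬ pvD <:+: l := fun hin => by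
      have := (infix_iff_MS_len l).mp hin
      rw [← hps] at this
      omega
    rw [rfind_neg l hnotin]
    simp [Nat.not_lt.mpr hk]
  · have hk2 : 2 ≤ ps.length := by omega
    have hpsne : ps ≠ [] := by
      intro e; rw [e] at hk2; simp at hk2
    set qs := ps.dropLast with hqs
    set x := ps.getLast hpsne with hx
    have hsplit : qs ++ [x] = ps := List.dropLast_append_getLast hpsne
    have hqlen : qs.length = ps.length - 1 := by
      rw [hqs, List.length_dropLast]
    have hqne : qs ≠ [] := by
      intro e; rw [e] at hqlen; simp at hqlen; omega
    have hfree := MS_free l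
    rw [← hps] at hfree
    have hxfree : ¬ pvD <:+: x := hfree x (List.getLast_mem hpsne)
    have hqfree : ∀ q ∈ qs, ¬ pvD <:+: q := fun q hq =>
      hfree q (List.dropLast_subset ps hq)
    have hlshape : l = PySem.Chars.join pvD qs ++ pvD ++ x := by
      have hj := join_MS l
      rw [← hps] at hj
      rw [← hj, ← hsplit, join_concat pvD x qs hqne]
    set m := (PySem.Chars.join pvD qs).length with hm
    have hrf : PySem.Chars.rfind l pvD = (m : Int) := by
      rw [hlshape]; exact rfind_pos _ x hxfree
    have hhead : PySem.List.slice l none (some (m : Int)) = PySem.Chars.join pvD qs := by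
      rw [PySem.List.slice_to_natCast, hlshape, List.append_assoc,
        List.take_append_of_le_length (le_rfl), List.take_length]
    simp only [hrf, hhead]
    rw [if_neg (by omega : ¬((m : Int) = -1))]
    have hMShead : MS pvD (PySem.Chars.join pvD qs) = qs := MS_join_pieces qs hqne hqfree
    rw [if_pos (by omega : ps.length > 1),
      checkDTags_main o.toList c.toList ps hk2]
    obtain ⟨p0, ps', hps'⟩ : ∃ p0 ps', ps = p0 :: ps' := by
      cases h : ps with
      | nil => exact absurd h hpsne
      | cons a b => exact ⟨a, b, rfl⟩
    have hget0 : PySem.List.pyGetD ps 0 [] = p0 := by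
      rw [hps']; exact PySem.List.pyGetD_zero_cons p0 ps' []
    by_cases h3 : 2 < ps.length
    · -- three or more pieces: B's replace path
      have hisin : PySem.Chars.isIn pvD (PySem.Chars.join pvD qs) = true := by
        rw [PySem.Chars.isIn_iff_infix, infix_iff_MS_len, hMShead]
        omega
      simp only [hisin, replace_eq_MS, hMShead, if_pos h3, hget0]
      have hmid : PySem.List.slice ps (some 1) (some (-1)) = qs.drop 1 := by
        have h1 : PySem.List.slice ps (some 1) (some (-1))
            = List.take (ps.length - 2) (List.drop 1 ps) := by
          simp [PySem.List.slice, Nat.min_eq_left (show 1 ≤ ps.length by omega)]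
          rw [show ps.length - 1 - 1 = ps.length - 2 from by omega]
          omega
        have h2 : qs.drop 1 = List.take (ps.length - 2) (List.drop 1 ps) := by
          rw [hqs, List.dropLast_eq_take, List.drop_take]
          congr 1
        rw [h1, h2]
      obtain ⟨p1, ps2, hp1⟩ : ∃ p1 ps2, ps' = p1 :: ps2 := by
        cases hh : ps' with
        | nil => exfalso; rw [hps', hh] at h3; simp at h3
        | cons a b => exact ⟨a, b, rfl⟩
      obtain ⟨y, ps3, hy⟩ : ∃ y ps3, ps2 = y :: ps3 := by
        cases hh : ps2 with
        | nil => exfalso; rw [hps', hp1, hh] at h3; simp at h3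
        | cons a b => exact ⟨a, b, rfl⟩
      have hqe : qs = p0 :: p1 :: (y :: ps3).dropLast := by
        rw [hqs, hps', hp1, hy, List.dropLast_cons₂, List.dropLast_cons₂]
      rw [hmid]
      congr 1
      rw [hqe]
      simp [PySem.Chars.join_cons_cons, List.append_assoc]
    · -- exactly two pieces: B appends only closingTag
      have hlen2 : ps.length = 2 := by omega
      obtain ⟨p1, hp1⟩ : ∃ p1, ps' = [p1] := by
        cases hh : ps' with
        | nil => exfalso; rw [hps', hh] at hlen2; simp at hlen2
        | cons a b =>
          cases hb : b with
          | nil => exact ⟨a, rfl⟩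
          | cons a' b' => exfalso; rw [hps', hh, hb] at hlen2; simp at hlen2
      have hq1 : qs = [p0] := by
        rw [hqs, hps', hp1]
        simp
      have hisin : PySem.Chars.isIn pvD p0 = false := by
        rw [Bool.eq_false_iff]
        intro hc
        exact hfree p0 (by rw [hps']; exact List.mem_cons_self)
          ((PySem.Chars.isIn_iff_infix pvD p0).mp hc)
      simp only [hq1, PySem.Chars.join_singleton, hisin, Bool.false_eq_true, if_false,
        if_neg h3, hget0]
      simp
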